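-- pv_equiv track=rewrite | github.com/y-garcia/udacity_nanodegree_data_structures_and_algorithms | project1/Task4.py | get_telemarketers
-- ===== SOURCE A (Python) =====
-- def get_telemarketers(texts_list, calls_list):
--     telemarketers = set()
--     texters_or_receivers = set()
--     texts_count = len(texts_list)
--     calls_count = len(calls_list)
--     for i in range(max(texts_count, calls_count)):
--         if i < texts_count:
--             outgoing_texter = texts_list[i][0]
--             receiving_texter = texts_list[i][1]
--             texters_or_receivers.add(outgoing_texter)
--             texters_or_receivers.add(receiving_texter)
--         if i < calls_count:
--             receiving_number = calls_list[i][1]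
--             texters_or_receivers.add(receiving_number)
--
--     for call in calls_list:
--         outgoing_number = call[0]
--         if outgoing_number not in texters_or_receivers:
--             telemarketers.add(outgoing_number)
--
--     return sorted(telemarketers)
-- ===== SOURCE B (Python) =====
-- def get_telemarketers(texts_list, calls_list):
--     callers = sorted(c[0] for c in calls_list)
--     disq = sorted([t[0] for t in texts_list] + [t[1] for t in texts_list]
--                   + [c[1] for c in calls_list])
--     out = []
--     j = 0
--     m = len(disq)
--     for x in callers:
--         while j < m and disq[j] < x:
--             j += 1
--         if (j < m and disq[j] == x) or (out and out[-1] == x):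
--             continue
--         out.append(x)
--     return out
-- ===== Notes on version B (the rewrite author's own statement) =====
-- stated objective: alternative
-- what changed: Replaces A's hash-set construction and membership-filter loop with a sort-then-merge algorithm: both the callers and the combined disqualifier list are sorted, then a single two-pointer sweep emits callers absent from the disqualifiers, deduplicating by comparing with the last emitted element.
import Mathlib
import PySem

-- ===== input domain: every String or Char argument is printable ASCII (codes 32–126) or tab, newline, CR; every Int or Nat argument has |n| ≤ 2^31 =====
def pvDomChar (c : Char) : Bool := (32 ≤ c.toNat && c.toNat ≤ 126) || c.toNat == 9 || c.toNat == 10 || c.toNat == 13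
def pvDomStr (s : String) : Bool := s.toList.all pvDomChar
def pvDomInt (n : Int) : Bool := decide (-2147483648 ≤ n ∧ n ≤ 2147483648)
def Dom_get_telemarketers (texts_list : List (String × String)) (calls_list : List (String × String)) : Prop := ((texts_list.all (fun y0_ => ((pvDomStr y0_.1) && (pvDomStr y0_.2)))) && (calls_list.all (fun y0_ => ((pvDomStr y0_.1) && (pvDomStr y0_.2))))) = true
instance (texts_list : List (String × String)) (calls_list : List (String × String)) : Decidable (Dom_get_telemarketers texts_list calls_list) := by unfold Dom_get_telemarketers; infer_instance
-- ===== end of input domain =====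

-- B replaces A's hash-set build + membership-filter loop by sorting callers and disqualifiers
-- and taking their difference in one two-pointer merge sweep (alternative algorithm, same cost).

-- ===== PORT A =====
-- A's first loop body splits into its two guarded blocks
def pvStepT (texts_list : List (String × String)) (s : PySem.Set String) (i : Int) : PySem.Set String :=
  if i < (texts_list.length : Int) then
    match PySem.List.pyGet? texts_list i with
    | some t => (s.add t.1).add t.2
    | none => s
  else s

def pvStepC (calls_list : List (String × String)) (s : PySem.Set String) (i : Int) : PySem.Set String :=
  if i < (calls_list.length : Int) then
    match PySem.List.pyGet? calls_list i with
    | some c => s.add c.2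
    | none => s
  else s

def pvStepA (texts_list calls_list : List (String × String)) (s : PySem.Set String) (i : Int) : PySem.Set String :=
  pvStepC calls_list (pvStepT texts_list s i) i

def get_telemarketers (texts_list : List (String × String)) (calls_list : List (String × String)) : List String :=
  let texts_count : Int := texts_list.length
  let calls_count : Int := calls_list.length
  let texters_or_receivers : PySem.Set String :=
    (PySem.List.pyRange 0 (max texts_count calls_count) 1).foldl
      (pvStepA texts_list calls_list) PySem.Set.empty
  let telemarketers : PySem.Set String :=
    calls_list.foldl
      (fun tm call => if ¬ (PySem.Set.contains texters_or_receivers call.1 = true) then tm.add call.1 else tm)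
      PySem.Set.empty
  PySem.List.sorted telemarketers (fun x => x) false

-- ===== PORT B =====
-- Source B's inner 'while j < m and disq[j] < x: j += 1' = dropping the leading elements < x
def pvSkipLt (x : String) : List String → List String
  | [] => []
  | d :: ds => if d < x then pvSkipLt x ds else d :: ds

-- Source B's 'for x in callers' loop: state = remaining disq suffix and the output so far
def pvMergeLoop (out : List String) (ds : List String) : List String → List String
  | [] => out
  | x :: cs =>
    let ds' := pvSkipLt x ds
    if ds'.head? = some x ∨ out.getLast? = some x then pvMergeLoop out ds' cs
    else pvMergeLoop (out ++ [x]) ds' cs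

def get_telemarketers_alt (texts_list : List (String × String)) (calls_list : List (String × String)) : List String :=
  let callers := PySem.List.sorted (calls_list.map Prod.fst) (fun x => x) false
  let disq := PySem.List.sorted
      (texts_list.map Prod.fst ++ texts_list.map Prod.snd ++ calls_list.map Prod.snd) (fun x => x) false
  pvMergeLoop [] disq callers

-- ===== PRECONDITION & SPEC =====
def Spec_get_telemarketers (texts_list : List (String × String)) (calls_list : List (String × String)) (out : List String) : Prop := out = get_telemarketers_alt texts_list calls_list
instance (texts_list : List (String × String)) (calls_list : List (String × String)) (out : List String) : Decidable (Spec_get_telemarketers texts_list calls_list out) := by unfold Spec_get_telemarketers; infer_instance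

-- ===== CLAIM (what is proved, stated in full; the proofs are below) =====
def Claim_equal_get_telemarketers : Prop := ∀ (texts_list : List (String × String)) (calls_list : List (String × String)), Dom_get_telemarketers texts_list calls_list → Spec_get_telemarketers texts_list calls_list (get_telemarketers texts_list calls_list)

-- ===== LEMMAS AND PROOFS =====

-- membership after each guarded block, at a nonnegative index
theorem mem_pvStepT (texts_list : List (String × String)) (s : PySem.Set String) (k : Nat) (x : String) :
    x ∈ pvStepT texts_list s (k : Int) ↔
      x ∈ s ∨ (∃ t, texts_list[k]? = some t ∧ (x = t.1 ∨ x = t.2)) := by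
  unfold pvStepT
  rw [PySem.List.pyGet?_natCast]
  by_cases ht : k < texts_list.length
  · rw [if_pos (by exact_mod_cast ht), List.getElem?_eq_getElem ht]
    simp only [PySem.Set.mem_add, Option.some.injEq]
    constructor
    · rintro ((h | rfl) | rfl)
      · exact Or.inl h
      · exact Or.inr ⟨_, rfl, Or.inl rfl⟩
      · exact Or.inr ⟨_, rfl, Or.inr rfl⟩
    · rintro (h | ⟨t, rfl, rfl | rfl⟩) <;> tauto
  · rw [if_neg (by exact_mod_cast ht), List.getElem?_eq_none_iff.mpr (by omega)]
    simp

theorem mem_pvStepC (calls_list : List (String × String)) (s : PySem.Set String) (k : Nat) (x : String) :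
    x ∈ pvStepC calls_list s (k : Int) ↔
      x ∈ s ∨ (∃ c, calls_list[k]? = some c ∧ x = c.2) := by
  unfold pvStepC
  rw [PySem.List.pyGet?_natCast]
  by_cases hc : k < calls_list.length
  · rw [if_pos (by exact_mod_cast hc), List.getElem?_eq_getElem hc]
    simp only [PySem.Set.mem_add, Option.some.injEq]
    constructor
    · rintro (h | rfl)
      · exact Or.inl h
      · exact Or.inr ⟨_, rfl, rfl⟩
    · rintro (h | ⟨c, rfl, rfl⟩) <;> tauto
  · rw [if_neg (by exact_mod_cast hc), List.getElem?_eq_none_iff.mpr (by omega)]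
    simp

theorem mem_pvStepA (texts_list calls_list : List (String × String)) (s : PySem.Set String)
    (k : Nat) (x : String) :
    x ∈ pvStepA texts_list calls_list s (k : Int) ↔
      x ∈ s ∨ (∃ t, texts_list[k]? = some t ∧ (x = t.1 ∨ x = t.2))
            ∨ (∃ c, calls_list[k]? = some c ∧ x = c.2) := by
  unfold pvStepA
  rw [mem_pvStepC, mem_pvStepT, or_assoc]

-- membership in the prefix loop over range(0, n)
theorem mem_loopA (texts_list calls_list : List (String × String)) (n : Nat) (s : PySem.Set String) (x : String) :
    x ∈ (PySem.List.pyRange 0 (n : Int) 1).foldl (pvStepA texts_list calls_list) s ↔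
      x ∈ s ∨ (∃ k < n, (∃ t, texts_list[k]? = some t ∧ (x = t.1 ∨ x = t.2))
                      ∨ (∃ c, calls_list[k]? = some c ∧ x = c.2)) := by
  induction n generalizing s with
  | zero => simp [PySem.List.pyRange_one_eq_nil (by omega : (0:Int) ≤ 0)]
  | succ m ih =>
    rw [show ((m + 1 : Nat) : Int) = (m : Int) + 1 by push_cast; ring,
        PySem.List.pyRange_one_succ_right (Int.natCast_nonneg m), List.foldl_append]
    simp only [List.foldl_cons, List.foldl_nil]
    rw [mem_pvStepA, ih]
    constructor
    · rintro ((h | ⟨k, hk, h⟩) | h | h)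
      · exact Or.inl h
      · exact Or.inr ⟨k, by omega, h⟩
      · exact Or.inr ⟨m, by omega, Or.inl h⟩
      · exact Or.inr ⟨m, by omega, Or.inr h⟩
    · rintro (h | ⟨k, hk, h⟩)
      · exact Or.inl (Or.inl h)
      · rcases Nat.lt_succ_iff_lt_or_eq.mp hk with hk' | rfl
        · exact Or.inl (Or.inr ⟨k, hk', h⟩)
        · rcases h with h | h
          · exact Or.inr (Or.inl h)
          · exact Or.inr (Or.inr h)

-- membership in A's texters_or_receivers set
theorem mem_trA (texts_list calls_list : List (String × String)) (x : String) :
    x ∈ (PySem.List.pyRange 0 (max (texts_list.length : Int) (calls_list.length : Int)) 1).foldl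
          (pvStepA texts_list calls_list) PySem.Set.empty ↔
      x ∈ texts_list.map Prod.fst ∨ x ∈ texts_list.map Prod.snd ∨ x ∈ calls_list.map Prod.snd := by
  have hmax : max (texts_list.length : Int) (calls_list.length : Int) =
      ((max texts_list.length calls_list.length : Nat) : Int) := by push_cast; rfl
  rw [hmax, mem_loopA]
  simp only [PySem.Set.empty, List.not_mem_nil, false_or]
  constructor
  · rintro ⟨k, hk, ⟨t, h1, h4 | h4⟩ | ⟨c, h1, h4⟩⟩
    · exact Or.inl (List.mem_map.mpr ⟨t, List.mem_of_getElem? h1, h4.symm⟩)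
    · exact Or.inr (Or.inl (List.mem_map.mpr ⟨t, List.mem_of_getElem? h1, h4.symm⟩))
    · exact Or.inr (Or.inr (List.mem_map.mpr ⟨c, List.mem_of_getElem? h1, h4.symm⟩))
  · rintro (h | h | h) <;> obtain ⟨p, hp, rfl⟩ := List.mem_map.mp h <;>
      obtain ⟨k, hk, hget⟩ := List.getElem_of_mem hp
    · exact ⟨k, by omega, Or.inl ⟨p, by simp [List.getElem?_eq_getElem hk, hget], Or.inl rfl⟩⟩
    · exact ⟨k, by omega, Or.inl ⟨p, by simp [List.getElem?_eq_getElem hk, hget], Or.inr rfl⟩⟩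
    · exact ⟨k, by omega, Or.inr ⟨p, by simp [List.getElem?_eq_getElem hk, hget], rfl⟩⟩

-- A's second loop: membership and nodup
theorem mem_tmA (calls_list : List (String × String)) (tr tm : PySem.Set String) (x : String) :
    x ∈ calls_list.foldl
          (fun tm call => if ¬ (PySem.Set.contains tr call.1 = true) then tm.add call.1 else tm) tm ↔
      x ∈ tm ∨ (x ∈ calls_list.map Prod.fst ∧ x ∉ tr) := by
  induction calls_list generalizing tm with
  | nil => simp
  | cons c cs ih =>
    simp only [List.foldl_cons, List.map_cons, List.mem_cons]
    by_cases hc : PySem.Set.contains tr c.1 = true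
    · have hmem := (PySem.Set.contains_iff tr c.1).mp hc
      rw [if_neg (by simpa using hc), ih]
      constructor
      · rintro (h | ⟨h, hn⟩)
        · exact Or.inl h
        · exact Or.inr ⟨Or.inr h, hn⟩
      · rintro (h | ⟨h | h, hn⟩)
        · exact Or.inl h
        · subst h; exact absurd hmem hn
        · exact Or.inr ⟨h, hn⟩
    · have hnm : c.1 ∉ tr := fun h => hc ((PySem.Set.contains_iff tr c.1).mpr h)
      rw [if_pos (by simpa using hc), ih]
      simp only [PySem.Set.mem_add]
      constructor
      · rintro ((h | rfl) | ⟨h, hn⟩)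
        · exact Or.inl h
        · exact Or.inr ⟨Or.inl rfl, hnm⟩
        · exact Or.inr ⟨Or.inr h, hn⟩
      · rintro (h | ⟨h | h, hn⟩)
        · exact Or.inl (Or.inl h)
        · exact Or.inl (Or.inr h)
        · exact Or.inr ⟨h, hn⟩

theorem nodup_tmA (calls_list : List (String × String)) (tr tm : PySem.Set String) (h : tm.Nodup) :
    (calls_list.foldl
      (fun tm call => if ¬ (PySem.Set.contains tr call.1 = true) then tm.add call.1 else tm) tm).Nodup := by
  induction calls_list generalizing tm with
  | nil => exact h
  | cons c cs ih =>
    simp only [List.foldl_cons]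
    split_ifs with hc
    all_goals first
      | exact ih _ (PySem.Set.nodup_add _ _ h)
      | exact ih _ h

-- ===== B-side lemmas =====

theorem mem_pvSkipLt (x z : String) (ds : List String) (hxz : x ≤ z) :
    z ∈ pvSkipLt x ds ↔ z ∈ ds := by
  induction ds with
  | nil => simp [pvSkipLt]
  | cons d ds ih =>
    by_cases hd : d < x
    · rw [pvSkipLt, if_pos hd, ih]
      have : z ≠ d := fun h => absurd (h ▸ hd) (not_lt.mpr hxz)
      simp [this]
    · rw [pvSkipLt, if_neg hd]

theorem pairwise_pvSkipLt (x : String) (ds : List String) (h : ds.Pairwise (· ≤ ·)) :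
    (pvSkipLt x ds).Pairwise (· ≤ ·) := by
  induction ds with
  | nil => exact h
  | cons d ds ih =>
    rw [pvSkipLt]
    rcases List.pairwise_cons.mp h with ⟨h1, h2⟩
    split_ifs with hd
    · exact ih h2
    · exact List.pairwise_cons.mpr ⟨h1, h2⟩

theorem le_of_mem_pvSkipLt (x z : String) (ds : List String) (h : ds.Pairwise (· ≤ ·))
    (hz : z ∈ pvSkipLt x ds) : x ≤ z := by
  induction ds with
  | nil => simp [pvSkipLt] at hz
  | cons d ds ih =>
    rw [pvSkipLt] at hz
    rcases List.pairwise_cons.mp h with ⟨h1, h2⟩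
    split_ifs at hz with hd
    · exact ih h2 hz
    · rcases List.mem_cons.mp hz with rfl | hz'
      · exact not_lt.mp hd
      · exact le_trans (not_lt.mp hd) (h1 _ hz')

-- x is in the skipped suffix iff it is its head (the suffix is sorted and all its elements are ≥ x)
theorem mem_pvSkipLt_iff_head (x : String) (ds : List String) (h : ds.Pairwise (· ≤ ·)) :
    x ∈ pvSkipLt x ds ↔ (pvSkipLt x ds).head? = some x := by
  constructor
  · intro hx
    cases hds : pvSkipLt x ds with
    | nil => simp [hds] at hx
    | cons d ds' =>
      have hge : x ≤ d := le_of_mem_pvSkipLt x d ds h (hds ▸ List.mem_cons_self)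
      have hp : (d :: ds').Pairwise (· ≤ ·) := hds ▸ pairwise_pvSkipLt x ds h
      rcases List.mem_cons.mp (hds ▸ hx) with rfl | hx'
      · simp
      · have : d ≤ x := (List.pairwise_cons.mp hp).1 _ hx'
        simp [le_antisymm hge this]
  · intro hh
    exact List.mem_of_mem_head? (by rw [hh]; rfl)

-- in a strictly increasing list every element is ≤ the last one
theorem le_getLast_of_pairwise_lt : ∀ (out : List String), out.Pairwise (· < ·) →
    ∀ y ∈ out, ∃ l, out.getLast? = some l ∧ y ≤ l
  | [], _, y, hy => by simp at hy
  | [a], _, y, hy => by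
    rcases List.mem_singleton.mp hy with rfl
    exact ⟨y, rfl, le_refl y⟩
  | a :: b :: bs, h, y, hy => by
    rcases List.pairwise_cons.mp h with ⟨h1, h2⟩
    have hrec := le_getLast_of_pairwise_lt (b :: bs) h2
    rcases List.mem_cons.mp hy with rfl | hy'
    · obtain ⟨l, hl, hbl⟩ := hrec b List.mem_cons_self
      exact ⟨l, by rw [List.getLast?_cons_cons]; exact hl,
        le_trans (le_of_lt (h1 b List.mem_cons_self)) hbl⟩
    · obtain ⟨l, hl, hyl⟩ := hrec y hy'
      exact ⟨l, by rw [List.getLast?_cons_cons]; exact hl, hyl⟩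

-- the merge sweep: it stays strictly increasing and collects exactly out ∪ (cs \ ds)
theorem pvMergeLoop_spec (cs : List String) : ∀ (ds out : List String),
    cs.Pairwise (· ≤ ·) → ds.Pairwise (· ≤ ·) → out.Pairwise (· < ·) →
    (∀ y ∈ out, ∀ x ∈ cs, y ≤ x) →
    (pvMergeLoop out ds cs).Pairwise (· < ·) ∧
      (∀ z, z ∈ pvMergeLoop out ds cs ↔ z ∈ out ∨ (z ∈ cs ∧ z ∉ ds)) := by
  induction cs with
  | nil => intro ds out _ _ hout _; exact ⟨hout, by simp [pvMergeLoop]⟩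
  | cons x cs ih =>
    intro ds out hcs hds hout hle
    rcases List.pairwise_cons.mp hcs with ⟨hx1, hcs'⟩
    have hds' : (pvSkipLt x ds).Pairwise (· ≤ ·) := pairwise_pvSkipLt x ds hds
    have hmemds' : ∀ z, x ≤ z → (z ∈ pvSkipLt x ds ↔ z ∈ ds) := fun z hz => mem_pvSkipLt x z ds hz
    rw [pvMergeLoop]
    by_cases hcond : (pvSkipLt x ds).head? = some x ∨ out.getLast? = some x
    · rw [if_pos hcond]
      obtain ⟨hp, hm⟩ := ih (pvSkipLt x ds) out hcs' hds' hout
        (fun y hy x' hx' => hle y hy x' (List.mem_cons_of_mem _ hx'))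
      refine ⟨hp, fun z => ?_⟩
      rw [hm]
      have hxcase : x ∈ out ∨ x ∈ ds := by
        rcases hcond with hh | hh
        · exact Or.inr ((hmemds' x le_rfl).mp (List.mem_of_mem_head? (by rw [hh]; rfl)))
        · exact Or.inl (List.mem_of_getLast? hh)
      constructor
      · rintro (h | ⟨h1, h2⟩)
        · exact Or.inl h
        · exact Or.inr ⟨List.mem_cons_of_mem _ h1, fun hc => h2 ((hmemds' z (hx1 z h1)).mpr hc)⟩
      · rintro (h | ⟨h1, h2⟩)
        · exact Or.inl h
        · rcases List.mem_cons.mp h1 with rfl | h1'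
          · rcases hxcase with h' | h'
            · exact Or.inl h'
            · exact absurd h' h2
          · exact Or.inr ⟨h1', fun hc => h2 ((hmemds' z (hx1 z h1')).mp hc)⟩
    · rw [if_neg hcond]
      rw [not_or] at hcond
      obtain ⟨hcnd1, hcnd2⟩ := hcond
      have hxnotds : x ∉ ds := fun hc => by
        have : x ∈ pvSkipLt x ds := (hmemds' x le_rfl).mpr hc
        exact hcnd1 ((mem_pvSkipLt_iff_head x ds hds).mp this)
      have houtx : ∀ y ∈ out, y < x := by
        intro y hy
        have hyx : y ≤ x := hle y hy x List.mem_cons_self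
        rcases lt_or_eq_of_le hyx with h | rfl
        · exact h
        · obtain ⟨l, hl, hyl⟩ := le_getLast_of_pairwise_lt out hout y hy
          have hlx : l ≤ y := by
            obtain ⟨l', hl', _⟩ := le_getLast_of_pairwise_lt out hout l (List.mem_of_getLast? hl)
            have hlmem : l ∈ out := List.mem_of_getLast? hl
            exact hle l hlmem y List.mem_cons_self
          have : l = y := le_antisymm hlx hyl
          exact absurd (this ▸ hl) hcnd2
      have hout' : (out ++ [x]).Pairwise (· < ·) := by
        rw [List.pairwise_append]
        exact ⟨hout, List.pairwise_singleton _ _, fun y hy z hz => by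
          rcases List.mem_singleton.mp hz with rfl; exact houtx y hy⟩
      obtain ⟨hp, hm⟩ := ih (pvSkipLt x ds) (out ++ [x]) hcs' hds' hout'
        (fun y hy x' hx' => by
          rcases List.mem_append.mp hy with h | h
          · exact hle y h x' (List.mem_cons_of_mem _ hx')
          · rcases List.mem_singleton.mp h with rfl; exact hx1 x' hx')
      refine ⟨hp, fun z => ?_⟩
      rw [hm]
      constructor
      · rintro (h | ⟨h1, h2⟩)
        · rcases List.mem_append.mp h with h' | h'
          · exact Or.inl h'
          · rcases List.mem_singleton.mp h' with rfl
            exact Or.inr ⟨List.mem_cons_self, hxnotds⟩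
        · exact Or.inr ⟨List.mem_cons_of_mem _ h1, fun hc => h2 ((hmemds' z (hx1 z h1)).mpr hc)⟩
      · rintro (h | ⟨h1, h2⟩)
        · exact Or.inl (List.mem_append.mpr (Or.inl h))
        · rcases List.mem_cons.mp h1 with rfl | h1'
          · exact Or.inl (List.mem_append.mpr (Or.inr (List.mem_singleton.mpr rfl)))
          · exact Or.inr ⟨h1', fun hc => h2 ((hmemds' z (hx1 z h1')).mp hc)⟩

theorem get_telemarketers_eq (texts_list calls_list : List (String × String)) :
    get_telemarketers texts_list calls_list = get_telemarketers_alt texts_list calls_list := by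
  have hA : get_telemarketers texts_list calls_list =
      PySem.List.sorted
        (calls_list.foldl
          (fun (tm : PySem.Set String) call =>
            if ¬ (PySem.Set.contains
                ((PySem.List.pyRange 0 (max (texts_list.length : Int) (calls_list.length : Int)) 1).foldl
                  (pvStepA texts_list calls_list) PySem.Set.empty) call.1 = true)
            then tm.add call.1 else tm)
          PySem.Set.empty)
        (fun x => x) false := rfl
  have hB : get_telemarketers_alt texts_list calls_list =
      pvMergeLoop []
        (PySem.List.sorted
          (texts_list.map Prod.fst ++ texts_list.map Prod.snd ++ calls_list.map Prod.snd)
          (fun x => x) false)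
        (PySem.List.sorted (calls_list.map Prod.fst) (fun x => x) false) := rfl
  rw [hA, hB]
  obtain ⟨hp, hm⟩ := pvMergeLoop_spec
      (PySem.List.sorted (calls_list.map Prod.fst) (fun x => x) false)
      (PySem.List.sorted
        (texts_list.map Prod.fst ++ texts_list.map Prod.snd ++ calls_list.map Prod.snd)
        (fun x => x) false)
      [] (PySem.List.sorted_pairwise _ _) (PySem.List.sorted_pairwise _ _)
      List.Pairwise.nil (by simp)
  refine PySem.List.sorted_eq_of_perm_of_pairwise_lt _ _ _ ?_ hp
  rw [List.perm_ext_iff_of_nodup (hp.imp ne_of_lt) (nodup_tmA _ _ PySem.Set.empty (by simp [PySem.Set.empty]))]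
  intro z
  rw [hm z, mem_tmA, mem_trA]
  simp only [PySem.Set.empty, List.not_mem_nil, false_or,
    PySem.List.mem_sorted, List.mem_append]
  tauto

-- ===== VERDICT (by name: the statement is the Claim_ definition above) =====
theorem get_telemarketers_spec : Claim_equal_get_telemarketers := by
  intro texts_list calls_list _
  exact get_telemarketers_eq texts_list calls_list
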